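-- pv_equiv track=rewrite | github.com/jae1jeong/Algorithm | Programmers/2017 팁스타운.py | solution
-- ===== SOURCE A (Python) =====
-- def solution(s):
--     answer = 0
--     stk = []
--     for i in range(len(s)):
--         if len(stk) >= 1 and stk[-1] == s[i]:
--             stk.pop()
--         else:
--             stk.append(s[i])
--
--     if len(stk) == 0:
--         answer = 1
--     return answer
-- ===== SOURCE B (Python) =====
-- def _find_remove(seq):
--     # first adjacent equal pair removed, or None if the sequence is irreducible
--     for i in range(len(seq) - 1):
--         if seq[i] == seq[i + 1]:
--             return seq[:i] + seq[i + 2:]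
--     return None
--
--
-- def solution(s):
--     seq = s
--     while True:
--         nxt = _find_remove(seq)
--         if nxt is None:
--             break
--         seq = nxt
--     return 1 if len(seq) == 0 else 0
-- ===== Notes on version B (the rewrite author's own statement) =====
-- stated objective: alternative
-- what changed: Replaces A's single-pass stack cancellation by a fixpoint loop that repeatedly finds and removes the first adjacent equal pair until none remains, then tests emptiness.
import Mathlib
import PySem

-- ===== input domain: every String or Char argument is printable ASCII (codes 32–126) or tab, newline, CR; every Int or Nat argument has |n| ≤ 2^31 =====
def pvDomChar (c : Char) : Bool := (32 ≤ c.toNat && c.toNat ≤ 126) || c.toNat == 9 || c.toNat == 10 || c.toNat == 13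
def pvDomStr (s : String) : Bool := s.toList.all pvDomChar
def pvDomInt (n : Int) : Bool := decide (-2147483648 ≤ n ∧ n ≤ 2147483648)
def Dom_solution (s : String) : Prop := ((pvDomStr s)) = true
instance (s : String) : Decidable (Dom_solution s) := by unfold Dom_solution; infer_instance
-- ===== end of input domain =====

-- B replaces A's one-pass stack cancellation by a fixpoint loop removing the first
-- adjacent equal pair until none remains (alternative decomposition, not faster).

-- ===== PORT A =====
-- Stack kept top-first: Python's append/pop at the END become cons/tail at the HEAD,
-- and stk[-1] is the head; this is exact for the stack discipline A uses.
def pvStep (stk : List Char) (c : Char) : List Char :=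
  if 1 ≤ stk.length ∧ stk.head? = some c then stk.tail else c :: stk

def solution (s : String) : Int :=
  let stk := s.toList.foldl pvStep []
  if stk.length = 0 then 1 else 0

-- ===== PORT B =====
-- transcription of Source B's _find_remove: scan for the first i with seq[i] == seq[i+1],
-- return the sequence with that pair removed, or none if irreducible
def pvFindRemove : List Char → Option (List Char)
  | a :: b :: t => if a = b then some t else (pvFindRemove (b :: t)).map (a :: ·)
  | _ => none

theorem pvFindRemove_length : ∀ (l l' : List Char), pvFindRemove l = some l' → l'.length < l.length
  | a :: b :: t, l', h => by
    by_cases hab : a = b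
    · simp [pvFindRemove, hab] at h; subst h; simp
    · simp only [pvFindRemove, if_neg hab, Option.map_eq_some_iff] at h
      obtain ⟨m, hm, rfl⟩ := h
      have := pvFindRemove_length (b :: t) m hm
      simpa using Nat.succ_lt_succ this
  | [], l', h => by simp [pvFindRemove] at h
  | [a], l', h => by simp [pvFindRemove] at h

-- the while loop of Source B: iterate _find_remove to a fixpoint
def pvReduce (l : List Char) : List Char :=
  match h : pvFindRemove l with
  | some l' => pvReduce l'
  | none => l
termination_by l.length
decreasing_by exact pvFindRemove_length _ _ h

def solution_alt (s : String) : Int :=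
  if (pvReduce s.toList).length = 0 then 1 else 0

-- ===== PRECONDITION & SPEC =====
def Spec_solution (s : String) (out : Int) : Prop := out = solution_alt s
instance (s : String) (out : Int) : Decidable (Spec_solution s out) := by unfold Spec_solution; infer_instance

-- ===== CLAIM (what is proved, stated in full; the proofs are below) =====
def Claim_equal_solution : Prop := ∀ (s : String), Dom_solution s → Spec_solution s (solution s)

-- ===== LEMMAS AND PROOFS =====

-- a reduced stack never has two equal adjacent elements
theorem pvStep_noadj (stk : List Char) (c : Char) (h : List.IsChain (· ≠ ·) stk) :
    List.IsChain (· ≠ ·) (pvStep stk c) := by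
  unfold pvStep
  split_ifs with hc
  · cases stk with
    | nil => exact List.IsChain.nil
    | cons t r => exact h.of_cons
  · cases stk with
    | nil => exact List.IsChain.singleton c
    | cons t r =>
      refine List.isChain_cons_cons.mpr ⟨?_, h⟩
      intro hct
      exact hc ⟨by simp, by simp [hct]⟩

theorem pvStep_noadj_foldl (l : List Char) (stk : List Char) (h : List.IsChain (· ≠ ·) stk) :
    List.IsChain (· ≠ ·) (l.foldl pvStep stk) := by
  induction l generalizing stk with
  | nil => exact h
  | cons c t ih => exact ih _ (pvStep_noadj stk c h)

-- pushing the same character twice is the identity on an irreducible stack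
theorem pvStep_twice (stk : List Char) (a : Char) (h : List.IsChain (· ≠ ·) stk) :
    pvStep (pvStep stk a) a = stk := by
  cases stk with
  | nil => simp [pvStep]
  | cons t r =>
    by_cases hta : t = a
    · subst hta
      have h1 : pvStep (t :: r) t = r := by simp [pvStep]
      rw [h1]
      cases r with
      | nil => simp [pvStep]
      | cons u r' =>
        have htu : t ≠ u := (List.isChain_cons_cons.mp h).1
        have : ¬ (1 ≤ (u :: r').length ∧ (u :: r').head? = some t) := by
          simp; exact fun hu => htu hu.symm
        unfold pvStep; rw [if_neg this]
    · have h1 : pvStep (t :: r) a = a :: t :: r := by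
        have : ¬ (1 ≤ (t :: r).length ∧ (t :: r).head? = some a) := by
          simp; exact hta
        unfold pvStep; rw [if_neg this]
      rw [h1]; simp [pvStep]

-- removing an adjacent equal pair does not change the stack result
theorem pvFold_remove_pair (xs ys : List Char) (a : Char) (stk : List Char)
    (h : List.IsChain (· ≠ ·) stk) :
    (xs ++ a :: a :: ys).foldl pvStep stk = (xs ++ ys).foldl pvStep stk := by
  rw [show xs ++ a :: a :: ys = (xs ++ [a, a]) ++ ys by simp,
      List.foldl_append, List.foldl_append, List.foldl_append]
  congr 1
  show pvStep (pvStep (xs.foldl pvStep stk) a) a = xs.foldl pvStep stk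
  exact pvStep_twice _ _ (pvStep_noadj_foldl xs stk h)

-- shape of a successful pair removal
theorem pvFindRemove_some : ∀ (l l' : List Char), pvFindRemove l = some l' →
    ∃ xs a ys, l = xs ++ a :: a :: ys ∧ l' = xs ++ ys
  | a :: b :: t, l', h => by
    by_cases hab : a = b
    · subst hab
      simp [pvFindRemove] at h
      exact ⟨[], a, t, by simp, by simp [← h]⟩
    · simp only [pvFindRemove, if_neg hab, Option.map_eq_some_iff] at h
      obtain ⟨m, hm, rfl⟩ := h
      obtain ⟨xs, c, ys, h1, h2⟩ := pvFindRemove_some (b :: t) m hm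
      exact ⟨a :: xs, c, ys, by simp [h1], by simp [h2]⟩
  | [], l', h => by simp [pvFindRemove] at h
  | [a], l', h => by simp [pvFindRemove] at h

-- a list with no removable pair is irreducible
theorem pvFindRemove_none : ∀ (l : List Char), pvFindRemove l = none → List.IsChain (· ≠ ·) l
  | [] , _ => List.IsChain.nil
  | [a], _ => List.IsChain.singleton a
  | a :: b :: t, h => by
    by_cases hab : a = b
    · simp [pvFindRemove, hab] at h
    · simp only [pvFindRemove, if_neg hab, Option.map_eq_none_iff] at h
      exact List.isChain_cons_cons.mpr ⟨hab, pvFindRemove_none (b :: t) h⟩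

-- an irreducible input just gets reversed onto the stack
theorem pvFold_irred : ∀ (l : List Char) (c : Char) (stk : List Char),
    List.IsChain (· ≠ ·) (c :: l) → l.foldl pvStep (c :: stk) = l.reverse ++ c :: stk
  | [], c, stk, _ => by simp
  | d :: t, c, stk, h => by
    have hcd : c ≠ d := (List.isChain_cons_cons.mp h).1
    have h1 : pvStep (c :: stk) d = d :: c :: stk := by
      have : ¬ (1 ≤ (c :: stk).length ∧ (c :: stk).head? = some d) := by
        simp; exact hcd
      unfold pvStep; rw [if_neg this]
    simp only [List.foldl_cons, h1]
    rw [pvFold_irred t d (c :: stk) (List.isChain_cons_cons.mp h).2]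
    simp

theorem pvReduce_some (l l' : List Char) (h : pvFindRemove l = some l') :
    pvReduce l = pvReduce l' := by
  rw [pvReduce]; split <;> simp_all

theorem pvReduce_none (l : List Char) (h : pvFindRemove l = none) : pvReduce l = l := by
  rw [pvReduce]; split <;> simp_all

theorem pvFold_eq_reduce (l : List Char) :
    l.foldl pvStep [] = (pvReduce l).foldl pvStep [] := by
  cases hl : pvFindRemove l with
  | none => rw [pvReduce_none l hl]
  | some l' =>
    rw [pvReduce_some l l' hl]
    obtain ⟨xs, a, ys, h1, h2⟩ := pvFindRemove_some l l' hl
    rw [h1, pvFold_remove_pair xs ys a [] List.IsChain.nil, ← h2]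
    exact pvFold_eq_reduce l'
termination_by l.length
decreasing_by exact pvFindRemove_length _ _ hl

theorem pvReduce_irred (l : List Char) : pvFindRemove (pvReduce l) = none := by
  cases hl : pvFindRemove l with
  | none => rw [pvReduce_none l hl]; exact hl
  | some l' =>
    rw [pvReduce_some l l' hl]
    exact pvReduce_irred l'
termination_by l.length
decreasing_by exact pvFindRemove_length _ _ hl

theorem pvFold_length (l : List Char) : (l.foldl pvStep []).length = (pvReduce l).length := by
  rw [pvFold_eq_reduce l]
  have hir := pvFindRemove_none _ (pvReduce_irred l)
  cases hr : pvReduce l with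
  | nil => simp
  | cons c t =>
    rw [hr] at hir
    have hs : pvStep [] c = [c] := by simp [pvStep]
    simp [List.foldl_cons, hs, pvFold_irred t c [] hir]

-- ===== VERDICT (by name: the statement is the Claim_ definition above) =====
theorem solution_spec : Claim_equal_solution := by
  intro s _
  unfold Spec_solution solution solution_alt
  simp only [pvFold_length]
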